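-- pv_equiv track=rewrite | github.com/MarcTheSpark/scamp | scamp/_metric_structure.py | flatten_beat_groups
-- ===== SOURCE A (Python) =====
-- from copy import deepcopy
-- from typing import Union, Sequence, List, TypeVar
--
-- def flatten_beat_groups(beat_groups: List[List], upbeats_before_group_length: bool = True) -> List:
--     """
--     Returns a flattened version of beat_groups, unraveling the outer layer according to rules of indispensability.
--     Repeated application of this function to nested beat groups leads to a 1-d ordered list of beat priorities
--
--     :param beat_groups: list of nested beat group
--     :param upbeats_before_group_length: This is best explained with an example. Consider a 5 = 2 + 3 beat pattern.
--         The Barlow approach to indispensability would give indispensabilities [4, 0, 3, 1, 2]. The idea would be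
--         downbeat first, then start of the group of 3, then upbeat to downbeat, and then the fourth eighth note because
--         it's the upbeat to that upbeat, and because he would say the eighth note right after the downbeat should be the
--         most dispensable. However, another way of looking at it would be to say that once we get to [4, _, 3, _, 2],
--         the next most indispensable beat should be the second eighth note, since it is the pickup to the second most
--         indispensable beat! This would yield indispensabilities [4, 1, 3, 0, 2], which also makes sense. I've chosen
--         to make this latter approach the default; I think it generally sounds more correct.
--     :return: a (perhaps still nested) list of beat groups with the outer layer unraveled so that it's a layer less deep
--     """
--     beat_groups = deepcopy(beat_groups)
--     out = []
--     # first big beats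
--     for sub_group in beat_groups:
--         out.append(sub_group.pop(0))
--
--     if upbeats_before_group_length:
--         # then the pickups to those beats
--         for sub_group in beat_groups:
--             if len(sub_group) > 0:
--                 out.append(sub_group.pop(0))
--
--     # then by the longest chain, and secondarily by order (big beat indispensability)
--     while True:
--         max_subgroup_length = max(len(sub_group) for sub_group in beat_groups)
--         if max_subgroup_length == 0:
--             break
--         else:
--             for sub_group in beat_groups:
--                 if len(sub_group) == max_subgroup_length:
--                     out.append(sub_group.pop(0))
--                     break
--     return out
-- ===== SOURCE B (Python) =====
-- def flatten_beat_groups(beat_groups, upbeats_before_group_length=True):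
--     """Level-bucket re-implementation: instead of rescanning all groups to find the
--     max length before every single pick, observe that the greedy pick order equals
--     taking levels maxlen, maxlen-1, ..., 1 and, at each level, taking from each group
--     (in order) whose remaining tail is at least that long the element whose distance
--     to the group's end is exactly the level."""
--     out = [g[0] for g in beat_groups]
--     if upbeats_before_group_length:
--         out += [g[1] for g in beat_groups if len(g) > 1]
--         tails = [g[2:] if len(g) > 1 else [] for g in beat_groups]
--     else:
--         tails = [g[1:] for g in beat_groups]
--     maxlen = 0
--     for t in tails:
--         if len(t) > maxlen:
--             maxlen = len(t)
--     level = maxlen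
--     while level > 0:
--         for t in tails:
--             if level <= len(t):
--                 out.append(t[len(t) - level])
--         level -= 1
--     return out
-- ===== Notes on version B (the rewrite author's own statement) =====
-- stated objective: faster
-- what changed: Replaces the per-pick rescan (recompute the max remaining length and linearly search for the first group of that length before every single appended element) by a level-bucket pass: the greedy pick order provably equals iterating level = maxlen..1 and taking, from each group in order whose remaining tail has length >= level, the element at distance level from the group's end, so each level is one scan.
import Mathlib
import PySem

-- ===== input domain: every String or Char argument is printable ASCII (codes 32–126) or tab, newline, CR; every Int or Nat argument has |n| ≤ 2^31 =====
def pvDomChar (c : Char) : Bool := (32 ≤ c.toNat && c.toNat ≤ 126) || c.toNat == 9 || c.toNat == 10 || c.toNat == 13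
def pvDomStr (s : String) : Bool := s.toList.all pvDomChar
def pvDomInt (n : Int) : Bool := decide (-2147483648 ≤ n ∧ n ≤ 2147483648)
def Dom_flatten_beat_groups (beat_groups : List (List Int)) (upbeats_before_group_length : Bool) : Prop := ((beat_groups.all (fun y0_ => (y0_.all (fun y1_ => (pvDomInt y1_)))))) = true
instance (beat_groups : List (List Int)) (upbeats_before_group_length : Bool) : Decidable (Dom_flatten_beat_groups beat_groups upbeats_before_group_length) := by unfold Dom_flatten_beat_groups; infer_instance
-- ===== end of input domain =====

-- B replaces A's per-pick rescan (max + linear search before every appended element) by one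
-- scan per level maxlen..1; equivalence of return values is proved on nonempty groups (A raises
-- otherwise).  Neither program mutates its argument (A deepcopies).

-- ===== PORT A =====

-- first loop: out.append(sub_group.pop(0)) for each sub_group (Python raises IndexError on an
-- empty sub_group; that input is outside Pre_, the port keeps the empty group and skips it)
def pvAFirsts : List (List Int) → List Int × List (List Int)
  | [] => ([], [])
  | g :: rest =>
    let r := pvAFirsts rest
    match g with
    | [] => (r.1, [] :: r.2)
    | x :: xs => (x :: r.1, xs :: r.2)

-- second loop: pop(0) only when the group is still nonempty
def pvASeconds : List (List Int) → List Int × List (List Int)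
  | [] => ([], [])
  | g :: rest =>
    let r := pvASeconds rest
    match g with
    | [] => (r.1, [] :: r.2)
    | x :: xs => (x :: r.1, xs :: r.2)

-- max(len(sub_group) for sub_group in beat_groups)  (Python raises on [], outside Pre_)
def pvMaxLen (gs : List (List Int)) : Nat := gs.foldl (fun a g => max a g.length) 0

-- the inner 'for sub_group in beat_groups: if len == max: out.append(pop(0)); break'
def pvPopFirst : List (List Int) → Nat → Option (Int × List (List Int))
  | [], _ => none
  | g :: rest, m =>
    if g.length = m then
      match g with
      | [] => none
      | x :: xs => some (x, xs :: rest)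
    else
      match pvPopFirst rest m with
      | some (x, rest') => some (x, g :: rest')
      | none => none

def pvTotal (gs : List (List Int)) : Nat := (gs.map List.length).sum

-- termination helper for the while-loop port (cited by decreasing_by)
theorem pvPopFirst_total_lt (gs : List (List Int)) (m : Nat) (x : Int)
    (gs' : List (List Int)) (h : pvPopFirst gs m = some (x, gs')) :
    pvTotal gs' < pvTotal gs := by
  induction gs generalizing gs' with
  | nil => simp [pvPopFirst] at h
  | cons g rest ih =>
    simp only [pvPopFirst] at h
    split at h
    · match g, h with
      | [], h => simp at h
      | y :: ys, h =>
        simp at h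
        obtain ⟨rfl, rfl⟩ := h
        simp [pvTotal]
    · cases hr : pvPopFirst rest m with
      | none => rw [hr] at h; simp at h
      | some p =>
        rw [hr] at h
        obtain ⟨x', rest'⟩ := p
        simp at h
        obtain ⟨rfl, rfl⟩ := h
        have := ih rest' hr
        simp [pvTotal] at this ⊢
        omega

-- while True: ... (each iteration pops one element, so total length decreases)
def pvWhileA (gs : List (List Int)) (out : List Int) : List Int :=
  if pvMaxLen gs = 0 then out
  else
    match h : pvPopFirst gs (pvMaxLen gs) with
    | some (x, gs') => pvWhileA gs' (out ++ [x])
    | none => out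
termination_by pvTotal gs
decreasing_by exact pvPopFirst_total_lt _ _ _ _ h

def flatten_beat_groups (beat_groups : List (List Int)) (upbeats_before_group_length : Bool) : List Int :=
  let r1 := pvAFirsts beat_groups
  let r2 := if upbeats_before_group_length then pvASeconds r1.2 else ([], r1.2)
  pvWhileA r2.2 (r1.1 ++ r2.1)

-- ===== PORT B =====

-- the 'while level > 0' loop of Source B, recursion on the level counter
def pvBLevels (tails : List (List Int)) : Nat → List Int → List Int
  | 0, out => out
  | l + 1, out =>
    pvBLevels tails l
      (tails.foldl
        (fun o t =>
          if l + 1 ≤ t.length then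
            o ++ [(PySem.List.pyGet? t ((t.length : Int) - (l + 1))).getD 0]
          else o)
        out)

def flatten_beat_groups_alt (beat_groups : List (List Int)) (upbeats_before_group_length : Bool) : List Int :=
  -- out = [g[0] for g in beat_groups]
  let out0 := beat_groups.map (fun g => (PySem.List.pyGet? g 0).getD 0)
  let r :=
    if upbeats_before_group_length then
      (out0 ++ beat_groups.filterMap (fun g => if 1 < g.length then PySem.List.pyGet? g 1 else none),
       beat_groups.map (fun g => if 1 < g.length then PySem.List.slice g (some 2) none else []))
    else
      (out0, beat_groups.map (fun g => PySem.List.slice g (some 1) none))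
  -- maxlen accumulation loop
  let maxlen := r.2.foldl (fun a t => if t.length > a then t.length else a) 0
  pvBLevels r.2 maxlen r.1

-- ===== PRECONDITION & SPEC =====
-- Pre_ excludes exactly the inputs on which A raises: the empty outer list (ValueError from
-- max() of an empty sequence) and any empty subgroup (IndexError from pop(0)).
def Pre_flatten_beat_groups (beat_groups : List (List Int)) (upbeats_before_group_length : Bool) : Prop :=
  beat_groups ≠ [] ∧ ∀ g ∈ beat_groups, g ≠ []
instance (beat_groups : List (List Int)) (upbeats_before_group_length : Bool) : Decidable (Pre_flatten_beat_groups beat_groups upbeats_before_group_length) := by unfold Pre_flatten_beat_groups; infer_instance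

def pvWitness_flatten_beat_groups : List (List Int) × Bool := ([[4, 0], [3, 1, 2]], true)

def Spec_flatten_beat_groups (beat_groups : List (List Int)) (upbeats_before_group_length : Bool) (out : List Int) : Prop := out = flatten_beat_groups_alt beat_groups upbeats_before_group_length
instance (beat_groups : List (List Int)) (upbeats_before_group_length : Bool) (out : List Int) : Decidable (Spec_flatten_beat_groups beat_groups upbeats_before_group_length out) := by unfold Spec_flatten_beat_groups; infer_instance

-- ===== CLAIM (what is proved, stated in full; the proofs are below) =====
def Claim_equal_flatten_beat_groups : Prop := ∀ (beat_groups : List (List Int)) (upbeats_before_group_length : Bool), Dom_flatten_beat_groups beat_groups upbeats_before_group_length → Pre_flatten_beat_groups beat_groups upbeats_before_group_length → Spec_flatten_beat_groups beat_groups upbeats_before_group_length (flatten_beat_groups beat_groups upbeats_before_group_length)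

-- ===== LEMMAS AND PROOFS =====

-- the elements appended at one level, as a filterMap
def pvPick (tails : List (List Int)) (l : Nat) : List Int :=
  tails.filterMap (fun t => if l ≤ t.length then some (t.getD (t.length - l) 0) else none)

-- all elements appended from level m down to 1
def pvLevs (tails : List (List Int)) : Nat → List Int
  | 0 => []
  | l + 1 => pvPick tails (l + 1) ++ pvLevs tails l

theorem pvBLevels_inner (tails : List (List Int)) (l : Nat) (out : List Int) :
    tails.foldl
      (fun o t =>
        if l + 1 ≤ t.length then
          o ++ [(PySem.List.pyGet? t ((t.length : Int) - (l + 1))).getD 0]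
        else o) out
    = out ++ pvPick tails (l + 1) := by
  induction tails generalizing out with
  | nil => simp [pvPick]
  | cons t ts ih =>
    simp only [List.foldl_cons, pvPick, List.filterMap_cons]
    by_cases h : l + 1 ≤ t.length
    · have : ((t.length : Int) - (l + 1)) = ((t.length - (l + 1) : Nat) : Int) := by omega
      rw [this]
      simp only [h, if_pos, ih, PySem.List.pyGet?_natCast]
      simp [pvPick, List.getD]
    · simp only [h, if_neg, ih, if_false]
      simp [pvPick, h]

theorem pvBLevels_eq (tails : List (List Int)) (m : Nat) (out : List Int) :
    pvBLevels tails m out = out ++ pvLevs tails m := by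
  induction m generalizing out with
  | zero => simp [pvBLevels, pvLevs]
  | succ l ih =>
    simp only [pvBLevels, pvLevs]
    rw [pvBLevels_inner, ih, List.append_assoc]

theorem pvMaxLen_le (gs : List (List Int)) : ∀ g ∈ gs, g.length ≤ pvMaxLen gs := by
  have key : ∀ (gs : List (List Int)) (a : Nat),
      a ≤ gs.foldl (fun a g => max a g.length) a ∧
      ∀ g ∈ gs, g.length ≤ gs.foldl (fun a g => max a g.length) a := by
    intro gs
    induction gs with
    | nil => simp
    | cons g rest ih =>
      intro a
      constructor
      · calc a ≤ max a g.length := le_max_left _ _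
          _ ≤ _ := (ih (max a g.length)).1
      · intro h hm
        simp only [List.foldl_cons]
        rcases List.mem_cons.1 hm with hm | hm
        · subst hm
          calc h.length ≤ max a h.length := le_max_right _ _
            _ ≤ _ := (ih _).1
        · exact (ih (max a g.length)).2 h hm
  exact (key gs 0).2

-- pvPopFirst succeeds when some group has positive length m
theorem pvPopFirst_isSome (gs : List (List Int)) (m : Nat) (hm : m ≠ 0)
    (h : ∃ g ∈ gs, g.length = m) : (pvPopFirst gs m).isSome := by
  induction gs with
  | nil => simp at h
  | cons g rest ih =>
    simp only [pvPopFirst]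
    by_cases hg : g.length = m
    · match g, hg with
      | [], hg => simp at hg; omega
      | x :: xs, hg => simp [hg]
    · simp only [hg, if_neg, if_false]
      have : ∃ g' ∈ rest, g'.length = m := by
        rcases h with ⟨g', hg', hl⟩
        rcases List.mem_cons.1 hg' with h1 | h1
        · exact absurd (h1 ▸ hl) hg
        · exact ⟨g', h1, hl⟩
      have := ih this
      cases hr : pvPopFirst rest m with
      | none => rw [hr] at this; simp at this
      | some p => obtain ⟨a, b⟩ := p; simp

-- structure of a successful pop: prefix of groups of length ≠ m, then the popped group
theorem pvPopFirst_spec (gs : List (List Int)) (m : Nat) (x : Int) (gs' : List (List Int))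
    (h : pvPopFirst gs m = some (x, gs')) :
    ∃ pre g suf, gs = pre ++ (x :: g) :: suf ∧ gs' = pre ++ g :: suf ∧
      (x :: g).length = m ∧ ∀ p ∈ pre, p.length ≠ m := by
  induction gs generalizing gs' with
  | nil => simp [pvPopFirst] at h
  | cons g rest ih =>
    simp only [pvPopFirst] at h
    split at h
    next hg =>
      match g, hg, h with
      | [], hg, h => simp at h
      | y :: ys, hg, h =>
        simp at h
        obtain ⟨rfl, rfl⟩ := h
        exact ⟨[], ys, rest, by simp, by simp, hg, by simp⟩
    next hg =>
      cases hr : pvPopFirst rest m with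
      | none => rw [hr] at h; simp at h
      | some p =>
        rw [hr] at h
        obtain ⟨x', rest'⟩ := p
        simp at h
        obtain ⟨rfl, rfl⟩ := h
        obtain ⟨pre, gg, suf, h1, h2, h3, h4⟩ := ih rest' hr
        refine ⟨g :: pre, gg, suf, by simp [h1], by simp [h2], h3, ?_⟩
        intro p hp
        rcases List.mem_cons.1 hp with hp | hp
        · exact hp ▸ hg
        · exact h4 p hp

theorem pvPick_append (a b : List (List Int)) (l : Nat) :
    pvPick (a ++ b) l = pvPick a l ++ pvPick b l := by
  simp [pvPick]

theorem pvPick_nil_of_lt (ts : List (List Int)) (l : Nat)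
    (h : ∀ t ∈ ts, t.length < l) : pvPick ts l = [] := by
  induction ts with
  | nil => simp [pvPick]
  | cons t ts ih =>
    have h1 := h t (by simp)
    simp only [pvPick, List.filterMap_cons]
    rw [if_neg (by omega)]
    exact ih (fun t ht => h t (by simp [ht]))

theorem pvLevs_congr (a b : List (List Int)) (j : Nat)
    (h : ∀ l, 1 ≤ l → l ≤ j → pvPick a l = pvPick b l) : pvLevs a j = pvLevs b j := by
  induction j with
  | zero => simp [pvLevs]
  | succ l ih =>
    simp only [pvLevs]
    rw [h (l + 1) (by omega) (le_refl _), ih (fun l' h1 h2 => h l' h1 (by omega))]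

theorem pvLevs_of_le (ts : List (List Int)) (m k : Nat) (hmk : m ≤ k)
    (h : ∀ t ∈ ts, t.length ≤ m) : pvLevs ts k = pvLevs ts m := by
  induction k with
  | zero => have : m = 0 := by omega
            simp [this]
  | succ l ih =>
    by_cases he : m = l + 1
    · simp [he]
    · have hml : m ≤ l := by omega
      simp only [pvLevs]
      rw [pvPick_nil_of_lt ts (l + 1) (fun t ht => by have := h t ht; omega)]
      simp [ih hml]

-- the foldl-max is attained by some group unless it equals the seed
theorem pvFoldlMax_attained (gs : List (List Int)) : ∀ (a : Nat),
    gs.foldl (fun a g => max a g.length) a = a ∨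
    ∃ g ∈ gs, g.length = gs.foldl (fun a g => max a g.length) a := by
  induction gs with
  | nil => intro a; left; rfl
  | cons g rest ih =>
    intro a
    simp only [List.foldl_cons]
    rcases ih (max a g.length) with h | h
    · rw [h]
      rcases Nat.le_total a g.length with hle | hle
      · right; exact ⟨g, by simp, by omega⟩
      · left; omega
    · obtain ⟨g', hg', he⟩ := h
      right; exact ⟨g', by simp [hg'], he⟩

theorem pvMaxLen_attained (gs : List (List Int)) (h : pvMaxLen gs ≠ 0) :
    ∃ g ∈ gs, g.length = pvMaxLen gs := by
  rcases pvFoldlMax_attained gs 0 with h0 | h0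
  · exact absurd h0 h
  · exact h0

-- main invariant: the while loop of A produces exactly the level decomposition
theorem pvWhileA_eq_aux (n : Nat) : ∀ (gs : List (List Int)) (out : List Int),
    pvTotal gs ≤ n → pvWhileA gs out = out ++ pvLevs gs (pvMaxLen gs) := by
  induction n with
  | zero =>
    intro gs out hn
    rw [pvWhileA]
    by_cases hm : pvMaxLen gs = 0
    · rw [if_pos hm, hm]; simp [pvLevs]
    · rw [if_neg hm]
      split
      next x gs' hpop =>
        have := pvPopFirst_total_lt _ _ _ _ hpop
        omega
      next hnone =>
        obtain ⟨g, hg, hlen⟩ := pvMaxLen_attained gs hm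
        have := pvPopFirst_isSome gs (pvMaxLen gs) hm ⟨g, hg, hlen⟩
        rw [hnone] at this
        simp at this
  | succ n ih =>
    intro gs out hn
    rw [pvWhileA]
    by_cases hm : pvMaxLen gs = 0
    · rw [if_pos hm, hm]; simp [pvLevs]
    · rw [if_neg hm]
      split
      next x gs' hpop =>
        have hlt := pvPopFirst_total_lt _ _ _ _ hpop
        rw [ih gs' (out ++ [x]) (by omega)]
        obtain ⟨pre, g, suf, hgs, hgs', hlen, hpre⟩ := pvPopFirst_spec _ _ _ _ hpop
        subst hgs; subst hgs'
        have hle := pvMaxLen_le (pre ++ (x :: g) :: suf)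
        have hgm : g.length + 1 = pvMaxLen (pre ++ (x :: g) :: suf) := by simpa using hlen
        set m' := pvMaxLen (pre ++ (x :: g) :: suf) with hm'
        have hle' : ∀ t ∈ pre ++ g :: suf, t.length ≤ m' := by
          intro t ht
          rcases List.mem_append.1 ht with h1 | h1
          · exact hle t (List.mem_append.2 (Or.inl h1))
          · rcases List.mem_cons.1 h1 with h1 | h1
            · subst h1; omega
            · exact hle t (by simp [h1])
        have hmax' : pvMaxLen (pre ++ g :: suf) ≤ m' := by
          have key : ∀ (ts : List (List Int)) (a : Nat), (∀ t ∈ ts, t.length ≤ m') → a ≤ m' →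
              ts.foldl (fun a g => max a g.length) a ≤ m' := by
            intro ts
            induction ts with
            | nil => intro a _ ha; simpa
            | cons t ts ihts =>
              intro a h ha
              simp only [List.foldl_cons]
              exact ihts _ (fun t' ht' => h t' (by simp [ht'])) (by have := h t (by simp); omega)
          exact key _ 0 hle' (by omega)
        rw [← pvLevs_of_le (pre ++ g :: suf) (pvMaxLen (pre ++ g :: suf)) m' hmax' (pvMaxLen_le _)]
        obtain ⟨l, hl⟩ : ∃ l, m' = l + 1 := ⟨m' - 1, by omega⟩
        rw [hl]
        simp only [pvLevs]
        have hpick_top : pvPick (pre ++ (x :: g) :: suf) (l + 1)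
            = x :: pvPick (pre ++ g :: suf) (l + 1) := by
          rw [pvPick_append, pvPick_append]
          rw [pvPick_nil_of_lt pre (l + 1) (fun t ht => by
            have h1 := hle t (List.mem_append.2 (Or.inl ht))
            have h2 := hpre t ht
            omega)]
          simp only [List.nil_append, pvPick, List.filterMap_cons]
          rw [if_pos (by simp; omega), if_neg (by omega)]
          have hz : g.length - l = 0 := by omega
          simp [List.getD, hz]
        have hpick_low : ∀ l', 1 ≤ l' → l' ≤ l →
            pvPick (pre ++ (x :: g) :: suf) l' = pvPick (pre ++ g :: suf) l' := by
          intro l' h1 h2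
          rw [pvPick_append, pvPick_append]
          congr 1
          simp only [pvPick, List.filterMap_cons]
          rw [if_pos (by simp; omega), if_pos (by omega)]
          congr 2
          have hx : (x :: g).length - l' = (g.length - l') + 1 := by simp; omega
          rw [hx]
          simp [List.getD]
        rw [hpick_top, pvLevs_congr _ _ l hpick_low]
        simp
      next hnone =>
        obtain ⟨g, hg, hlen⟩ := pvMaxLen_attained gs hm
        have := pvPopFirst_isSome gs (pvMaxLen gs) hm ⟨g, hg, hlen⟩
        rw [hnone] at this
        simp at this

theorem pvWhileA_eq (gs : List (List Int)) (out : List Int) :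
    pvWhileA gs out = out ++ pvLevs gs (pvMaxLen gs) :=
  pvWhileA_eq_aux (pvTotal gs) gs out (le_refl _)

-- front sections under Pre_
theorem pvAFirsts_eq (gs : List (List Int)) (h : ∀ g ∈ gs, g ≠ []) :
    pvAFirsts gs = (gs.map (fun g => (PySem.List.pyGet? g 0).getD 0), gs.map List.tail) := by
  induction gs with
  | nil => simp [pvAFirsts]
  | cons g rest ih =>
    match g, h g (by simp) with
    | x :: xs, _ =>
      simp only [pvAFirsts, List.map_cons]
      rw [ih (fun g hg => h g (by simp [hg]))]
      simp [PySem.List.pyGet?_zero_cons]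

theorem pvASeconds_eq (gs : List (List Int)) :
    pvASeconds gs = (gs.filterMap List.head?, gs.map List.tail) := by
  induction gs with
  | nil => simp [pvASeconds]
  | cons g rest ih =>
    match g with
    | [] => simp [pvASeconds, ih]
    | x :: xs => simp [pvASeconds, ih]

theorem pvMaxLen_foldl_eq (ts : List (List Int)) (a : Nat) :
    ts.foldl (fun a t => if t.length > a then t.length else a) a
      = ts.foldl (fun a g => max a g.length) a := by
  induction ts generalizing a with
  | nil => rfl
  | cons t ts ih =>
    simp only [List.foldl_cons]
    rw [ih]
    congr 1
    by_cases h : t.length > a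
    · simp [h]; omega
    · simp [h]; omega

-- ===== VERDICT (by name: the statement is the Claim_ definition above) =====
theorem flatten_beat_groups_spec : Claim_equal_flatten_beat_groups := by
  intro bg ub _ hpre
  obtain ⟨hne, hall⟩ := hpre
  unfold Spec_flatten_beat_groups flatten_beat_groups flatten_beat_groups_alt
  rw [pvAFirsts_eq bg hall]
  cases ub with
  | false =>
    simp only [Bool.false_eq_true, if_false]
    rw [pvWhileA_eq, pvBLevels_eq, pvMaxLen_foldl_eq]
    have hs : bg.map (fun g => PySem.List.slice g (some 1) none) = bg.map List.tail := by
      apply List.map_congr_left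
      intro g _
      rw [show ((1 : Int)) = ((1 : Nat) : Int) by norm_num, PySem.List.slice_from_natCast]
      exact List.drop_one
    rw [hs]
    simp [pvMaxLen]
  | true =>
    simp only [if_pos]
    rw [pvASeconds_eq]
    have ht : (bg.map List.tail).map List.tail
        = bg.map (fun g => if 1 < g.length then PySem.List.slice g (some 2) none else []) := by
      rw [List.map_map]
      apply List.map_congr_left
      intro g _
      by_cases h : 1 < g.length
      · rw [if_pos h, show ((2 : Int)) = ((2 : Nat) : Int) by norm_num, PySem.List.slice_from_natCast]
        cases g with
        | nil => simp at h
        | cons x g' =>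
          cases g' with
          | nil => simp at h
          | cons y ys => simp [Function.comp]
      · rw [if_neg h]
        cases g with
        | nil => simp
        | cons x g' =>
          cases g' with
          | nil => simp [Function.comp]
          | cons y ys => simp at h
    have hh : (bg.map List.tail).filterMap List.head?
        = bg.filterMap (fun g => if 1 < g.length then PySem.List.pyGet? g 1 else none) := by
      rw [List.filterMap_map]
      apply List.filterMap_congr
      intro g hg
      have hgne := hall g hg
      cases g with
      | nil => exact absurd rfl hgne
      | cons x g' =>
        cases g' with
        | nil => simp [Function.comp]
        | cons y ys =>
          simp only [Function.comp]
          rw [if_pos (by simp)]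
          rw [show ((1 : Int)) = ((1 : Nat) : Int) by norm_num, PySem.List.pyGet?_natCast]
          simp
    rw [pvWhileA_eq, pvBLevels_eq, pvMaxLen_foldl_eq, ht, hh]
    simp [pvMaxLen]
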